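-- pv_equiv track=rewrite | github.com/type37c/MQC_analysis | src/complex_error_detection.py | _find_error_clusters
-- ===== SOURCE A (Python) =====
-- def _find_error_clusters(positions, cluster_threshold=10):
--     """エラーの時間的クラスタリング"""
--     if not positions:
--         return []
--
--     positions = sorted(positions)
--     clusters = []
--     current_cluster = [positions[0]]
--
--     for i in range(1, len(positions)):
--         if positions[i] - positions[i-1] <= cluster_threshold:
--             current_cluster.append(positions[i])
--         else:
--             clusters.append(current_cluster)
--             current_cluster = [positions[i]]
--
--     clusters.append(current_cluster)
--
--     return [{'start': min(cluster), 'end': max(cluster), 'size': len(cluster)}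
--             for cluster in clusters]
-- ===== SOURCE B (Python) =====
-- def _find_error_clusters(positions, cluster_threshold=10):
--     """Staged: collect boundary indices where the sorted gap exceeds the
--     threshold, then summarize each [a, b) segment directly via its endpoints."""
--     if not positions:
--         return []
--     s = sorted(positions)
--     n = len(s)
--     bounds = [i for i in range(1, n) if s[i] - s[i - 1] > cluster_threshold]
--     edges = [0] + bounds + [n]
--     return [{'start': s[a], 'end': s[b - 1], 'size': b - a}
--             for a, b in zip(edges, edges[1:])]
-- ===== Notes on version B (the rewrite author's own statement) =====
-- stated objective: alternative
-- what changed: Instead of a single accumulator pass that grows explicit cluster lists and then maps min/max/len over them, B first builds a table of boundary indices (where the sorted gap exceeds the threshold) and then summarizes each segment between consecutive boundaries directly from its endpoint indices (s[a], s[b-1], b-a), exploiting sortedness so first==min and last==max.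
import Mathlib
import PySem

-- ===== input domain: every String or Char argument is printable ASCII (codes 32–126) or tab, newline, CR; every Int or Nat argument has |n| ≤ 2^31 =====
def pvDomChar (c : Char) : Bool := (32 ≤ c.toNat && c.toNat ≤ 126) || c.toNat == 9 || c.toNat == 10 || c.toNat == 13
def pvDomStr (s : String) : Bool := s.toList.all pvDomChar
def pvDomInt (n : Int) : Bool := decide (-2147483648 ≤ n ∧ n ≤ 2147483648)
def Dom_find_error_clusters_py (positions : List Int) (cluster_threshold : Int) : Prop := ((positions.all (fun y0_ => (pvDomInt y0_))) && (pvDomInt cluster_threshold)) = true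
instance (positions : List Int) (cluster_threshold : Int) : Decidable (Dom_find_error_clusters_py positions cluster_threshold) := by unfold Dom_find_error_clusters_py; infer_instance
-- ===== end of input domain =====

-- B replaces A's accumulator pass (grow cluster lists, then map min/max/len) by a staged
-- boundary-index table plus per-segment endpoint summaries (objective: alternative; return value only — neither version mutates its input).

-- ===== PORT A =====
def find_error_clusters_py (positions : List Int) (cluster_threshold : Int) : List (List (String × Int)) :=
  if positions = [] then []
  else
    let s := PySem.List.sorted positions (fun x => x) false
    let res := (PySem.List.pyRange 1 (s.length : Int) 1).foldl
      (fun (st : List (List Int) × List Int) i =>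
        if PySem.List.pyGetD s i 0 - PySem.List.pyGetD s (i - 1) 0 ≤ cluster_threshold
        then (st.1, st.2 ++ [PySem.List.pyGetD s i 0])
        else (st.1 ++ [st.2], [PySem.List.pyGetD s i 0]))
      (([] : List (List Int)), [PySem.List.pyGetD s 0 0])
    (res.1 ++ [res.2]).map (fun c =>
      [("start", (PySem.List.min? c (fun x => x)).getD 0),
       ("end", (PySem.List.max? c (fun x => x)).getD 0),
       ("size", (c.length : Int))])

-- ===== PORT B =====
def find_error_clusters_py_alt (positions : List Int) (cluster_threshold : Int) : List (List (String × Int)) :=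
  if positions = [] then []
  else
    let s := PySem.List.sorted positions (fun x => x) false
    let n := (s.length : Int)
    let bounds := (PySem.List.pyRange 1 n 1).filter
      (fun i => decide (cluster_threshold < PySem.List.pyGetD s i 0 - PySem.List.pyGetD s (i - 1) 0))
    let edges := (0 : Int) :: bounds ++ [n]
    (edges.zip (edges.drop 1)).map (fun ab =>
      [("start", PySem.List.pyGetD s ab.1 0),
       ("end", PySem.List.pyGetD s (ab.2 - 1) 0),
       ("size", ab.2 - ab.1)])

-- ===== PRECONDITION & SPEC =====
def Spec_find_error_clusters_py (positions : List Int) (cluster_threshold : Int) (out : List (List (String × Int))) : Prop := out = find_error_clusters_py_alt positions cluster_threshold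
instance (positions : List Int) (cluster_threshold : Int) (out : List (List (String × Int))) : Decidable (Spec_find_error_clusters_py positions cluster_threshold out) := by unfold Spec_find_error_clusters_py; infer_instance

-- ===== CLAIM (what is proved, stated in full; the proofs are below) =====
def Claim_equal_find_error_clusters_py : Prop := ∀ (positions : List Int) (cluster_threshold : Int), Dom_find_error_clusters_py positions cluster_threshold → Spec_find_error_clusters_py positions cluster_threshold (find_error_clusters_py positions cluster_threshold)

-- ===== LEMMAS AND PROOFS =====

-- Intermediate form shared by the two sides: a last/start/size-carrying recursion.
def pvEntry (start last size : Int) : List (String × Int) :=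
  [("start", start), ("end", last), ("size", size)]

def pvBLoop (t : Int) (res : List (List (String × Int))) (start last size : Int) :
    List Int → List (List (String × Int))
  | [] => res ++ [pvEntry start last size]
  | p :: rest =>
    if p - last ≤ t then pvBLoop t res start p (size + 1) rest
    else pvBLoop t (res ++ [pvEntry start last size]) p p 1 rest

-- A's grouping loop rephrased as structural recursion over (previous element, remainder), and A's per-cluster summary.
def pvChain (t : Int) (st : List (List Int) × List Int) (prev : Int) :
    List Int → List (List Int) × List Int
  | [] => st
  | x :: rest =>
    if x - prev ≤ t then pvChain t (st.1, st.2 ++ [x]) x rest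
    else pvChain t (st.1 ++ [st.2], [x]) x rest

def pvSumm (c : List Int) : List (String × Int) :=
  [("start", (PySem.List.min? c (fun x => x)).getD 0),
   ("end", (PySem.List.max? c (fun x => x)).getD 0),
   ("size", (c.length : Int))]

-- B's boundary table from index j on, and its per-segment record.
def pvBnds (s : List Int) (t : Int) (j : Int) : List Int :=
  (PySem.List.pyRange j (s.length : Int) 1).filter
    (fun i => decide (t < PySem.List.pyGetD s i 0 - PySem.List.pyGetD s (i - 1) 0))

def pvRec (s : List Int) (a b : Int) : List (String × Int) :=
  [("start", PySem.List.pyGetD s a 0),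
   ("end", PySem.List.pyGetD s (b - 1) 0),
   ("size", b - a)]

def pvP (s : List Int) (E : List Int) : List (List (String × Int)) :=
  (E.zip (E.drop 1)).map (fun ab => pvRec s ab.1 ab.2)

lemma pvP_cons (s : List Int) (a b : Int) (l : List Int) :
    pvP s (a :: b :: l) = pvRec s a b :: pvP s (b :: l) := by
  simp [pvP]

lemma pv_last_is_max {l : List Int} {p : Int}
    (hs : l.Pairwise (· ≤ ·)) (hl : l.getLast? = some p) : ∀ y ∈ l, y ≤ p := by
  induction l with
  | nil => simp at hl
  | cons a tl ih =>
    cases tl with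
    | nil => simp_all
    | cons b tl' =>
      simp only [List.getLast?_cons_cons] at hl
      rcases List.pairwise_cons.mp hs with ⟨ha, hs'⟩
      intro y hy
      rcases List.mem_cons.mp hy with rfl | hy'
      · exact le_trans (ha b (by simp)) (ih hs' hl b (by simp))
      · exact ih hs' hl y hy'

lemma pv_summ_eq {l : List Int} {a p : Int}
    (hs : l.Pairwise (· ≤ ·)) (hh : l.head? = some a) (hl : l.getLast? = some p) :
    pvSumm l = pvEntry a p (l.length : Int) := by
  cases l with
  | nil => simp at hh
  | cons x tl =>
    obtain rfl : x = a := by simpa using hh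
    have hfst : ∀ y ∈ tl, x ≤ y := (List.pairwise_cons.mp hs).1
    have hmin : (PySem.List.min? (x :: tl) (fun x => x)).getD 0 = x := by
      obtain ⟨m, hm⟩ : ∃ m, PySem.List.min? (x :: tl) (fun x => x) = some m := by
        cases h : PySem.List.min? (x :: tl) (fun x => x) with
        | none => exact absurd ((PySem.List.min?_eq_none_iff _ _).mp h) (by simp)
        | some m => exact ⟨m, rfl⟩
      have hmem := PySem.List.min?_mem hm
      have hmins := PySem.List.min?_isMin hm x (by simp)
      have hle : x ≤ m := by
        rcases List.mem_cons.mp hmem with rfl | h'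
        · exact le_refl _
        · exact hfst m h'
      simp [hm, le_antisymm hmins hle]
    have hmax : (PySem.List.max? (x :: tl) (fun x => x)).getD 0 = p := by
      obtain ⟨m, hm⟩ : ∃ m, PySem.List.max? (x :: tl) (fun x => x) = some m := by
        cases h : PySem.List.max? (x :: tl) (fun x => x) with
        | none => exact absurd ((PySem.List.max?_eq_none_iff _ _).mp h) (by simp)
        | some m => exact ⟨m, rfl⟩
      have hmem := PySem.List.max?_mem hm
      have hple : p ≤ m := PySem.List.max?_isMax hm p (List.mem_of_getLast? hl)
      have hmle : m ≤ p := pv_last_is_max hs hl m hmem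
      simp [hm, le_antisymm hmle hple]
    simp [pvSumm, pvEntry, hmin, hmax]

lemma pv_chain_to_bloop (t : Int) :
    ∀ (rest : List Int) (prev : Int) (clusters : List (List Int)) (cur : List Int) (start : Int),
    (prev :: rest).Pairwise (· ≤ ·) →
    cur.Pairwise (· ≤ ·) → cur.head? = some start → cur.getLast? = some prev →
    ((pvChain t (clusters, cur) prev rest).1 ++ [(pvChain t (clusters, cur) prev rest).2]).map pvSumm
      = pvBLoop t (clusters.map pvSumm) start prev (cur.length : Int) rest := by
  intro rest
  induction rest with
  | nil =>
    intro prev clusters cur start _ hcs hch hcl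
    simp [pvChain, pvBLoop, pv_summ_eq hcs hch hcl]
  | cons x rest' ih =>
    intro prev clusters cur start hp hcs hch hcl
    rcases List.pairwise_cons.mp hp with ⟨hprev_le, hp'⟩
    have hpx : prev ≤ x := hprev_le x (by simp)
    have hcur_ne : cur ≠ [] := by intro h; subst h; simp at hch
    by_cases hc : x - prev ≤ t
    · simp only [pvChain, pvBLoop, if_pos hc]
      have hcs' : (cur ++ [x]).Pairwise (· ≤ ·) := by
        rw [List.pairwise_append]
        exact ⟨hcs, by simp, by
          intro y hy z hz
          simp at hz; subst hz
          exact le_trans (pv_last_is_max hcs hcl y hy) hpx⟩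
      have hch' : (cur ++ [x]).head? = some start := by
        rw [List.head?_append_of_ne_nil _ hcur_ne]
        exact hch
      have hcl' : (cur ++ [x]).getLast? = some x := by simp
      have := ih x clusters (cur ++ [x]) start hp' hcs' hch' hcl'
      simpa [List.length_append, Int.natCast_add] using this
    · simp only [pvChain, pvBLoop, if_neg hc]
      have := ih x (clusters ++ [cur]) [x] x hp' (by simp) (by simp) (by simp)
      simpa [pv_summ_eq hcs hch hcl] using this

lemma pv_idx_to_chain (t : Int) (s : List Int) :
    ∀ (n k : Nat) (st : List (List Int) × List Int), s.length - k = n → k < s.length →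
    (PySem.List.pyRange ((k : Int) + 1) (s.length : Int) 1).foldl
      (fun (st : List (List Int) × List Int) i =>
        if PySem.List.pyGetD s i 0 - PySem.List.pyGetD s (i - 1) 0 ≤ t
        then (st.1, st.2 ++ [PySem.List.pyGetD s i 0])
        else (st.1 ++ [st.2], [PySem.List.pyGetD s i 0])) st
    = pvChain t st (s.getD k 0) (s.drop (k + 1)) := by
  intro n
  induction n with
  | zero => intro k st h hk; omega
  | succ m ih =>
    intro k st h hk
    by_cases hlast : k + 1 = s.length
    · rw [PySem.List.pyRange_one_eq_nil (by omega), List.drop_eq_nil_of_le (by omega)]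
      simp [pvChain]
    · have hk1 : k + 1 < s.length := by omega
      rw [PySem.List.pyRange_one_cons (by exact_mod_cast (by omega : (k:Int)+1 < (s.length:Int)))]
      rw [List.foldl_cons]
      have e1 : ((k : Int) + 1) = ((k + 1 : Nat) : Int) := by push_cast; ring
      have e2 : ((k : Int) + 1 - 1) = ((k : Nat) : Int) := by ring
      have hget1 : PySem.List.pyGetD s ((k:Int)+1) 0 = s.getD (k+1) 0 := by
        rw [e1, PySem.List.pyGetD_natCast]
      have hget2 : PySem.List.pyGetD s ((k:Int)+1-1) 0 = s.getD k 0 := by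
        rw [e2, PySem.List.pyGetD_natCast]
      have hdrop : s.drop (k + 1) = s.getD (k+1) 0 :: s.drop (k + 2) := by
        rw [List.getD_eq_getElem _ _ hk1, ← List.drop_eq_getElem_cons hk1]
      rw [hdrop]
      simp only [hget1, hget2, pvChain]
      by_cases hc : s.getD (k+1) 0 - s.getD k 0 ≤ t
      · rw [if_pos hc, if_pos hc]
        have := ih (k+1) (st.1, st.2 ++ [s.getD (k+1) 0]) (by omega) hk1
        rw [e1]; exact this
      · rw [if_neg hc, if_neg hc]
        have := ih (k+1) (st.1 ++ [st.2], [s.getD (k+1) 0]) (by omega) hk1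
        rw [e1]; exact this

-- A's value, expressed through the intermediate recursion.
lemma pv_A_bloop (positions : List Int) (t p0 : Int) (rest : List Int)
    (hnil : positions ≠ [])
    (hs : PySem.List.sorted positions (fun x => x) false = p0 :: rest) :
    find_error_clusters_py positions t = pvBLoop t [] p0 p0 1 rest := by
  have hpw : (p0 :: rest).Pairwise (· ≤ ·) := by
    have := PySem.List.sorted_pairwise positions (fun x => x)
    rw [hs] at this; exact this
  have hget0 : PySem.List.pyGetD (p0 :: rest) 0 0 = p0 := by
    simpa using PySem.List.pyGetD_natCast (p0 :: rest) 0 0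
  have hidx := pv_idx_to_chain t (p0 :: rest) (p0 :: rest).length 0
    (([] : List (List Int)), [p0]) (by omega) (by simp)
  simp only [Nat.cast_zero, zero_add, List.getD_cons_zero, List.drop_one,
    List.tail_cons] at hidx
  have hch := pv_chain_to_bloop t rest p0 [] [p0] p0 hpw (by simp) (by simp) (by simp)
  simp only [find_error_clusters_py, if_neg hnil, hs, hget0]
  rw [hidx]
  simpa [pvSumm] using hch

-- The intermediate recursion equals B's boundary-table summarization.
lemma pv_bloop_bounds (t : Int) (s : List Int) :
    ∀ (m k a : Nat) (res : List (List (String × Int))),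
    s.length - (k + 1) = m → a ≤ k → k < s.length →
    pvBLoop t res (s.getD a 0) (s.getD k 0) ((k : Int) + 1 - (a : Int)) (s.drop (k + 1))
      = res ++ pvP s (((a : Int) :: pvBnds s t ((k : Int) + 1)) ++ [(s.length : Int)]) := by
  intro m
  induction m with
  | zero =>
    intro k a res h ha hk
    have hkn : k + 1 = s.length := by omega
    rw [List.drop_eq_nil_of_le (by omega)]
    have hbnds : pvBnds s t ((k : Int) + 1) = [] := by
      unfold pvBnds
      rw [PySem.List.pyRange_one_eq_nil (by exact_mod_cast (by omega : (s.length : Int) ≤ (k:Int)+1))]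
      rfl
    rw [hbnds]
    have hP : pvP s ([(a : Int)] ++ [(s.length : Int)]) = [pvRec s (a : Int) (s.length : Int)] := by
      simp [pvP]
    simp only [List.cons_append, List.nil_append] at hP ⊢
    rw [hP]
    have hga : PySem.List.pyGetD s (a : Int) 0 = s.getD a 0 := PySem.List.pyGetD_natCast s a 0
    have hgb : PySem.List.pyGetD s ((s.length : Int) - 1) 0 = s.getD k 0 := by
      have e : (s.length : Int) - 1 = ((k : Nat) : Int) := by omega
      rw [e, PySem.List.pyGetD_natCast]
    simp [pvBLoop, pvRec, pvEntry, hga, hgb]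
    omega
  | succ m' ih =>
    intro k a res h ha hk
    have hk1 : k + 1 < s.length := by omega
    have hdrop : s.drop (k + 1) = s.getD (k+1) 0 :: s.drop (k + 2) := by
      rw [List.getD_eq_getElem _ _ hk1, ← List.drop_eq_getElem_cons hk1]
    have e1 : ((k : Int) + 1) = ((k + 1 : Nat) : Int) := by push_cast; ring
    have hbpeel : pvBnds s t ((k : Int) + 1)
        = (if t < s.getD (k+1) 0 - s.getD k 0 then [((k:Int) + 1)] else [])
          ++ pvBnds s t ((k : Int) + 2) := by
      unfold pvBnds
      rw [PySem.List.pyRange_one_cons (by exact_mod_cast (by omega : (k:Int)+1 < (s.length:Int)))]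
      have hg1 : PySem.List.pyGetD s ((k:Int)+1) 0 = s.getD (k+1) 0 := by
        rw [e1, PySem.List.pyGetD_natCast]
      have hg2 : PySem.List.pyGetD s ((k:Int)+1-1) 0 = s.getD k 0 := by
        have e2 : ((k : Int) + 1 - 1) = ((k : Nat) : Int) := by ring
        rw [e2, PySem.List.pyGetD_natCast]
      rw [List.filter_cons]
      have e3 : ((k : Int) + 1 + 1) = ((k : Int) + 2) := by ring
      simp only [hg1, hg2, e3, decide_eq_true_eq]
      split_ifs with hcnd <;> simp
    rw [hdrop]
    by_cases hc : s.getD (k+1) 0 - s.getD k 0 ≤ t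
    · -- no boundary at k+1: bloop extends current summary
      have hb : pvBnds s t ((k : Int) + 1) = pvBnds s t ((k : Int) + 2) := by
        rw [hbpeel, if_neg (by omega)]; rfl
      simp only [pvBLoop, if_pos hc]
      have this1 := ih (k+1) a res (by omega) (by omega) hk1
      simp only [show ((k+1 : Nat) : Int) = (k : Int) + 1 from by push_cast; ring,
        show ((k : Int) + 1) + 1 = (k : Int) + 2 from by ring] at this1
      rw [hb, show ((k : Int) + 1 - (a : Int)) + 1 = (k : Int) + 2 - (a : Int) from by ring]
      rw [show ((k : Int) + 2 - (a : Int)) = ((k : Int) + 1) + 1 - (a : Int) from by ring] at this1 ⊢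
      exact this1
    · -- boundary at k+1: bloop emits the record and restarts
      have hb : pvBnds s t ((k : Int) + 1) = ((k:Int) + 1) :: pvBnds s t ((k : Int) + 2) := by
        rw [hbpeel, if_pos (by omega)]; rfl
      simp only [pvBLoop, if_neg hc]
      have this1 := ih (k+1) (k+1)
        (res ++ [pvEntry (s.getD a 0) (s.getD k 0) ((k : Int) + 1 - (a : Int))])
        (by omega) (le_refl _) hk1
      simp only [show ((k+1 : Nat) : Int) = (k : Int) + 1 from by push_cast; ring,
        show ((k : Int) + 1) + 1 = (k : Int) + 2 from by ring] at this1
      simp only [show k + 1 + 1 = k + 2 from rfl,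
        show (k : Int) + 2 - ((k : Int) + 1) = (1 : Int) from by ring] at this1
      rw [this1, hb]
      have hrec : pvRec s (a : Int) ((k : Int) + 1)
          = pvEntry (s.getD a 0) (s.getD k 0) ((k : Int) + 1 - (a : Int)) := by
        have hga : PySem.List.pyGetD s (a : Int) 0 = s.getD a 0 := PySem.List.pyGetD_natCast s a 0
        have hgb : PySem.List.pyGetD s ((k : Int) + 1 - 1) 0 = s.getD k 0 := by
          have e2 : ((k : Int) + 1 - 1) = ((k : Nat) : Int) := by ring
          rw [e2, PySem.List.pyGetD_natCast]
        simp [pvRec, pvEntry, hga, hgb]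
      simp only [List.cons_append, pvP_cons, hrec]
      simp
lemma pv_bloop_eq_alt (positions : List Int) (t p0 : Int) (rest : List Int)
    (hnil : positions ≠ [])
    (hs : PySem.List.sorted positions (fun x => x) false = p0 :: rest) :
    pvBLoop t [] p0 p0 1 rest = find_error_clusters_py_alt positions t := by
  have hlen : 0 < (p0 :: rest).length := by simp
  have := pv_bloop_bounds t (p0 :: rest) ((p0 :: rest).length - 1) 0 0 [] (by omega) (le_refl _) hlen
  simp only [Nat.cast_zero, zero_add, List.getD_cons_zero, List.drop_one, List.tail_cons,
    List.nil_append] at this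
  norm_num at this
  rw [this]
  simp only [find_error_clusters_py_alt, if_neg hnil, hs]
  rfl

theorem pv_main_eq (positions : List Int) (t : Int) :
    find_error_clusters_py positions t = find_error_clusters_py_alt positions t := by
  by_cases hnil : positions = []
  · simp [find_error_clusters_py, find_error_clusters_py_alt, hnil]
  · have hsn : PySem.List.sorted positions (fun x => x) false ≠ [] := by
      simpa [PySem.List.sorted_eq_nil_iff] using hnil
    cases hs : PySem.List.sorted positions (fun x => x) false with
    | nil => exact absurd hs hsn
    | cons p0 rest =>
      rw [pv_A_bloop positions t p0 rest hnil hs,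
          pv_bloop_eq_alt positions t p0 rest hnil hs]

-- ===== VERDICT (by name: the statement is the Claim_ definition above) =====
theorem find_error_clusters_py_spec : Claim_equal_find_error_clusters_py := by
  intro positions t _
  exact pv_main_eq positions t
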